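-- pv_equiv track=rewrite | github.com/rcohngru/advent-of-code | 2023/day-07/puzzle.py | insert_hand_p2
-- ===== SOURCE A (Python) =====
-- def insert_hand_p2(l, hand):
--   # hand is tuple containing hand and bet ('HAND', BET)
--   # lists are ordered from highest to lowest, comparing each element in hand
--   for i in range(len(l)):
--     if h1_ge_h2_p2(l[i][0], hand[0]):
--       continue
--     else:
--       l.insert(i, hand)
--       return l
--
--   l.append(hand)
--   return l
--
-- def h1_ge_h2_p2(h1, h2):
--   # returns true if h1 is greater than or equal to h2
--   cards = ['A', 'K', 'Q', 'T', '9', '8', '7', '6', '5', '4', '3', '2', 'J']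
--   for c1, c2 in zip(h1, h2):
--
--     if cards.index(c1) == cards.index(c2):
--       continue
--     elif cards.index(c1) < cards.index(c2):
--       return True
--     else:
--       return False
--
--   return True
-- ===== SOURCE B (Python) =====
-- def insert_hand_p2(l, hand):
--     # Binary search (bisect_right style) over precomputed strength keys,
--     # instead of a linear scan with repeated cards.index lookups.
--     # Mutates l in place (insert) and returns it, like the original.
--     cards = 'AKQT98765432J'
--     rank = {c: i for i, c in enumerate(cards)}
--     k = [rank[c] for c in hand[0]]
--     lo, hi = 0, len(l)
--     while lo < hi:
--         mid = (lo + hi) // 2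
--         if [rank[c] for c in l[mid][0]] <= k:
--             lo = mid + 1
--         else:
--             hi = mid
--     l.insert(lo, hand)
--     return l
-- ===== Notes on version B (the rewrite author's own statement) =====
-- stated objective: alternative
-- what changed: Replaces the linear scan with repeated cards.index lookups by a precomputed rank dictionary, precomputed strength keys, and a hand-written bisect_right binary search over the (high-to-low) sorted list.
-- outside the precondition, e.g. on insert_hand_p2([], ('X', 5)): A returns [('X', 5)], B raises KeyError; on insert_hand_p2([('AK', 1)], ('A', 2)): A returns [('AK', 1), ('A', 2)], B returns [('A', 2), ('AK', 1)]
import Mathlib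
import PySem

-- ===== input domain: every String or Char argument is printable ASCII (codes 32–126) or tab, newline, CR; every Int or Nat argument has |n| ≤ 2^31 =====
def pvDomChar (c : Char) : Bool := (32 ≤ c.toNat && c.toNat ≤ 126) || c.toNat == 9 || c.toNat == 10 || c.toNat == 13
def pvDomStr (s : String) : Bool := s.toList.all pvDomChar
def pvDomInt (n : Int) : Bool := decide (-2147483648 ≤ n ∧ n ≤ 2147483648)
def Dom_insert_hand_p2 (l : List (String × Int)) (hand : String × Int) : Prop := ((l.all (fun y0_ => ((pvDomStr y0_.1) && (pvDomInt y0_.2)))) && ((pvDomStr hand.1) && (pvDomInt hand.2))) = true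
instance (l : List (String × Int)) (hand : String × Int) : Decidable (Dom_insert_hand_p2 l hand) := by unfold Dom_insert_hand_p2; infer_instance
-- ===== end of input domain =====

-- B replaces A's linear scan (with repeated cards.index lookups) by a precomputed rank map,
-- strength keys and a bisect_right-style binary search; both mutate l in place in Python and the
-- equivalence proved here is about the returned list.


-- ===== PORT A =====
def pvCardsA : List Char := ['A','K','Q','T','9','8','7','6','5','4','3','2','J']

-- h1_ge_h2_p2: zip truncates to the shorter hand; cards.index raises ValueError on a char
-- not in cards (Pre_ excludes that; the .getD 0 default is never reached inside Pre_).
def pvGeP2 : List Char → List Char → Bool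
  | c1 :: t1, c2 :: t2 =>
    let i1 := (PySem.List.index? pvCardsA c1).getD 0
    let i2 := (PySem.List.index? pvCardsA c2).getD 0
    if i1 = i2 then pvGeP2 t1 t2
    else if i1 < i2 then true else false
  | _, _ => true

def pvScanA (hand : String × Int) : List (String × Int) → List (String × Int)
  | [] => [hand]
  | x :: xs =>
    if pvGeP2 x.1.toList hand.1.toList then x :: pvScanA hand xs
    else hand :: x :: xs

def insert_hand_p2 (l : List (String × Int)) (hand : String × Int) : List (String × Int) :=
  pvScanA hand l

-- ===== PORT B =====
-- rank = {c: i for i, c in enumerate(cards)}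
def pvRankB : PySem.Dict Char Int :=
  (PySem.List.enumerate ("AKQT98765432J".toList) 0).foldl
    (fun d p => d.insert p.2 p.1) PySem.Dict.empty

-- [rank[c] for c in h]; rank[c] raises KeyError outside the 13 cards (excluded by Pre_)
def pvKeyB (s : String) : List Int := s.toList.map (fun c => pvRankB.getD c 0)

-- Python list `<=` (lexicographic, shorter prefix is smaller)
def pvListLeB : List Int → List Int → Bool
  | [], _ => true
  | _ :: _, [] => false
  | a :: as, b :: bs => if a < b then true else if b < a then false else pvListLeB as bs

-- the while-loop binary search of Source B
def pvBisectB (l : List (String × Int)) (k : List Int) (lo hi : Nat) : Nat :=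
  if _h : lo < hi then
    let mid := (lo + hi) / 2
    if pvListLeB (pvKeyB (l.getD mid ("", 0)).1) k then pvBisectB l k (mid + 1) hi
    else pvBisectB l k lo mid
  else lo
termination_by hi - lo
decreasing_by all_goals omega

def insert_hand_p2_alt (l : List (String × Int)) (hand : String × Int) : List (String × Int) :=
  let k := pvKeyB hand.1
  let lo := pvBisectB l k 0 l.length
  PySem.List.insert l (lo : Int) hand

-- ===== PRECONDITION & SPEC =====
def pvKeyPre (s : String) : List Nat := s.toList.map (fun c => pvCardsA.idxOf c)

-- Pre_ excludes (a) hands with characters outside the 13-card alphabet, on which the index/rank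
-- lookups raise (ValueError in A, KeyError in B) except in degenerate early-return cases;
-- (b) inputs where the new hand's key is a proper prefix of a stored hand's key, where A's
-- zip-truncation tie and B's lexicographic order are both defensible readings of an unspecified
-- corner; and (c) lists in which some stored hand ranking below the new hand precedes one
-- ranking at or above it (the list is documented as kept ordered highest-to-lowest, which
-- guarantees this never happens); there a linear and a binary search legitimately disagree.
def pvValidStr (s : String) : Bool := s.toList.all (fun c => pvCardsA.contains c)

def Pre_insert_hand_p2 (l : List (String × Int)) (hand : String × Int) : Prop :=
  pvValidStr hand.1 = true ∧
  l.all (fun p => pvValidStr p.1 &&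
    !((pvKeyPre hand.1).isPrefixOf (pvKeyPre p.1) &&
      decide ((pvKeyPre hand.1).length < (pvKeyPre p.1).length))) = true ∧
  l.Pairwise (fun a b =>
    (pvKeyPre b.1 = pvKeyPre hand.1 ∨ List.Lex (· < ·) (pvKeyPre b.1) (pvKeyPre hand.1)) →
    (pvKeyPre a.1 = pvKeyPre hand.1 ∨ List.Lex (· < ·) (pvKeyPre a.1) (pvKeyPre hand.1)))

instance (l : List (String × Int)) (hand : String × Int) : Decidable (Pre_insert_hand_p2 l hand) := by
  unfold Pre_insert_hand_p2; infer_instance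

def pvWitness_insert_hand_p2 : (List (String × Int)) × (String × Int) :=
  ([("A2345", 1), ("23456", 2)], ("KKKKK", 3))

def Spec_insert_hand_p2 (l : List (String × Int)) (hand : String × Int) (out : List (String × Int)) : Prop := out = insert_hand_p2_alt l hand
instance (l : List (String × Int)) (hand : String × Int) (out : List (String × Int)) : Decidable (Spec_insert_hand_p2 l hand out) := by unfold Spec_insert_hand_p2; infer_instance

-- ===== CLAIM (what is proved, stated in full; the proofs are below) =====
def Claim_equal_insert_hand_p2 : Prop := ∀ (l : List (String × Int)) (hand : String × Int), Dom_insert_hand_p2 l hand → Pre_insert_hand_p2 l hand → Spec_insert_hand_p2 l hand (insert_hand_p2 l hand)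

-- ===== LEMMAS AND PROOFS =====

-- the Boolean lexicographic comparison the proofs factor both orders through
def pvLexLePre : List Nat → List Nat → Bool
  | [], _ => true
  | _ :: _, [] => false
  | a :: as, b :: bs => if a < b then true else if b < a then false else pvLexLePre as bs


-- per-card agreement of the three index computations (finite check over the 13 cards)
theorem pv_char_idxA (c : Char) (hc : c ∈ pvCardsA) :
    (PySem.List.index? pvCardsA c).getD 0 = pvCardsA.idxOf c := by
  fin_cases hc <;> decide

theorem pv_char_rankB (c : Char) (hc : c ∈ pvCardsA) :
    pvRankB.getD c 0 = (pvCardsA.idxOf c : Int) := by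
  fin_cases hc <;> decide

-- the lex comparison on Int keys agrees with the Nat-key one used by Pre_
theorem pv_lexle_cast (a b : List Nat) :
    pvListLeB (a.map Int.ofNat) (b.map Int.ofNat) = pvLexLePre a b := by
  induction a generalizing b with
  | nil => cases b <;> simp [pvListLeB, pvLexLePre]
  | cons x xs ih =>
    cases b with
    | nil => simp [pvListLeB, pvLexLePre]
    | cons y ys =>
      rw [List.map_cons, List.map_cons]
      simp only [pvListLeB, pvLexLePre]
      rcases Nat.lt_trichotomy x y with h | h | h
      · simp [h]
      · subst h; simp [ih]
      · simp [h, Nat.lt_asymm h]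

theorem pv_keyB_eq (s : String) (h : ∀ c ∈ s.toList, c ∈ pvCardsA) :
    pvKeyB s = (pvKeyPre s).map Int.ofNat := by
  unfold pvKeyB pvKeyPre
  rw [List.map_map]
  exact List.map_congr_left (fun c hc => by simp [pv_char_rankB c (h c hc)])

-- A's hand comparison is the lexicographic key comparison, for valid hands whose second key
-- is not a proper prefix of the first (there zip truncation and lex order part ways)
theorem pv_ge_eq_lex (as bs : List Char) (ha : ∀ c ∈ as, c ∈ pvCardsA)
    (hb : ∀ c ∈ bs, c ∈ pvCardsA)
    (hnp : ¬((bs.map (fun c => pvCardsA.idxOf c)) <+: (as.map (fun c => pvCardsA.idxOf c)) ∧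
             (bs.map (fun c => pvCardsA.idxOf c)).length < (as.map (fun c => pvCardsA.idxOf c)).length)) :
    pvGeP2 as bs = pvLexLePre (as.map (fun c => pvCardsA.idxOf c)) (bs.map (fun c => pvCardsA.idxOf c)) := by
  induction as generalizing bs with
  | nil => cases bs with
    | nil => decide
    | cons y ys => simp [pvGeP2, pvLexLePre]
  | cons x xs ih =>
    cases bs with
    | nil => exact absurd ⟨List.nil_prefix, by simp⟩ hnp
    | cons y ys =>
      rw [List.map_cons, List.map_cons]
      simp only [pvGeP2, pvLexLePre]
      rw [pv_char_idxA x (ha x (by simp)), pv_char_idxA y (hb y (by simp))]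
      by_cases h1 : pvCardsA.idxOf x < pvCardsA.idxOf y
      · simp [h1, Nat.ne_of_lt h1]
      · by_cases h2 : pvCardsA.idxOf y < pvCardsA.idxOf x
        · simp [h1, h2, Nat.ne_of_gt h2]
        · have he : pvCardsA.idxOf x = pvCardsA.idxOf y := Nat.le_antisymm (Nat.le_of_not_lt h2) (Nat.le_of_not_lt h1)
          simp only [he, Nat.lt_irrefl]
          refine ih ys (fun c hc => ha c (by simp [hc])) (fun c hc => hb c (by simp [hc])) ?_
          rintro ⟨hpfx, hlt⟩
          exact hnp ⟨List.cons_prefix_cons.mpr ⟨he.symm, hpfx⟩, by simpa using hlt⟩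

-- the Boolean lex comparison is Mathlib's lexicographic order-or-equal
theorem pv_lexle_iff (a b : List Nat) : pvLexLePre a b = true ↔ (a = b ∨ List.Lex (· < ·) a b) := by
  induction a generalizing b with
  | nil =>
    cases b with
    | nil => simp [pvLexLePre]
    | cons y ys =>
      simp only [pvLexLePre, true_iff]
      exact Or.inr List.Lex.nil
  | cons x xs ih =>
    cases b with
    | nil =>
      simp only [pvLexLePre, Bool.false_eq_true, false_iff]
      rintro (he | hl)
      · exact absurd he (by simp)
      · cases hl
    | cons y ys =>
      simp only [pvLexLePre]
      rcases Nat.lt_trichotomy x y with h | h | h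
      · simp [h, List.Lex.rel h]
      · subst h
        rw [if_neg (Nat.lt_irrefl x), if_neg (Nat.lt_irrefl x), ih ys]
        constructor
        · rintro (rfl | hl)
          · exact Or.inl rfl
          · exact Or.inr (List.Lex.cons hl)
        · rintro (he | hl)
          · exact Or.inl (by injection he)
          · cases hl with
            | rel h => exact absurd h (Nat.lt_irrefl x)
            | cons h => exact Or.inr h
      · simp only [if_neg (Nat.lt_asymm h), if_pos h]
        constructor
        · intro hf; exact absurd hf (by simp)
        · rintro (he | hl)
          · injection he with h1 _; omega
          · cases hl with
            | rel h2 => omega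
            | cons h2 => omega

-- A's scan is takeWhile/dropWhile around hand
theorem pv_scanA_eq (hand : String × Int) (l : List (String × Int)) :
    pvScanA hand l =
      l.takeWhile (fun x => pvGeP2 x.1.toList hand.1.toList) ++
        hand :: l.dropWhile (fun x => pvGeP2 x.1.toList hand.1.toList) := by
  induction l with
  | nil => rfl
  | cons x xs ih =>
    by_cases h : pvGeP2 x.1.toList hand.1.toList
    · simp [pvScanA, h, ih]
    · simp [pvScanA, h]

-- the binary search finds the boundary index t of any monotone predicate split
theorem pv_bisect_eq (l : List (String × Int)) (k : List Int) (t : Nat)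
    (hpre : ∀ j (hj : j < l.length), j < t → pvListLeB (pvKeyB l[j].1) k = true)
    (hpost : ∀ j (hj : j < l.length), t ≤ j → pvListLeB (pvKeyB l[j].1) k = false) :
    ∀ n lo hi, hi - lo ≤ n → lo ≤ t → t ≤ hi → hi ≤ l.length → pvBisectB l k lo hi = t := by
  intro n
  induction n with
  | zero =>
    intro lo hi hfuel hlo hhi hlen
    have hlh : lo = hi := by omega
    subst hlh
    rw [pvBisectB, dif_neg (Nat.lt_irrefl lo)]
    omega
  | succ n ihn =>
    intro lo hi hfuel hlo hhi hlen
    rw [pvBisectB]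
    by_cases hlt : lo < hi
    · simp only [dif_pos hlt]
      have hmid1 : lo ≤ (lo + hi) / 2 := by omega
      have hmid2 : (lo + hi) / 2 < hi := by omega
      have hmidlen : (lo + hi) / 2 < l.length := by omega
      rw [List.getD_eq_getElem l ("", 0) hmidlen]
      by_cases hp : pvListLeB (pvKeyB l[(lo + hi) / 2].1) k = true
      · have htm : (lo + hi) / 2 < t := by
          by_contra hc
          have := hpost ((lo + hi) / 2) hmidlen (by omega)
          simp [hp] at this
        simp only [hp]
        exact ihn ((lo + hi) / 2 + 1) hi (by omega) (by omega) hhi hlen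
      · have htm : t ≤ (lo + hi) / 2 := by
          by_contra hc
          exact hp (hpre ((lo + hi) / 2) hmidlen (by omega))
        rw [if_neg hp]
        exact ihn lo ((lo + hi) / 2) (by omega) hlo (by omega) (by omega)
    · simp only [dif_neg hlt]; omega

-- small takeWhile/dropWhile facts not present in Mathlib under these names
theorem pv_takeWhile_congr {α : Type} (p q : α → Bool) (l : List α)
    (h : ∀ a ∈ l, p a = q a) : l.takeWhile p = l.takeWhile q := by
  induction l with
  | nil => rfl
  | cons x xs ih =>
    simp only [List.takeWhile_cons, h x (by simp)]
    by_cases hq : q x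
    · simp [hq, ih (fun a ha => h a (by simp [ha]))]
    · simp [hq]

theorem pv_dropWhile_congr {α : Type} (p q : α → Bool) (l : List α)
    (h : ∀ a ∈ l, p a = q a) : l.dropWhile p = l.dropWhile q := by
  induction l with
  | nil => rfl
  | cons x xs ih =>
    simp only [List.dropWhile_cons, h x (by simp)]
    by_cases hq : q x
    · simp [hq, ih (fun a ha => h a (by simp [ha]))]
    · simp [hq]

theorem pv_boundary {α : Type} (p : α → Bool) (l : List α)
    (h : (l.takeWhile p).length < l.length) : p (l[(l.takeWhile p).length]'h) = false := by
  induction l with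
  | nil => simp at h
  | cons x xs ih =>
    by_cases hp : p x
    · have h' : (xs.takeWhile p).length < xs.length := by
        simpa [List.takeWhile_cons, hp] using h
      have := ih h'
      simpa [hp] using this
    · simp [hp]

set_option maxHeartbeats 1000000 in
theorem insert_hand_p2_spec : Claim_equal_insert_hand_p2 := by
  intro l hand _hdom hpre
  obtain ⟨hhand0, hl0, hsorted0⟩ := hpre
  have hhand : ∀ c ∈ hand.1.toList, c ∈ pvCardsA := by
    simpa [pvValidStr, List.all_eq_true, List.contains_iff_mem] using hhand0
  have hl : ∀ p ∈ l, (∀ c ∈ p.1.toList, c ∈ pvCardsA) ∧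
      ¬(pvKeyPre hand.1 <+: pvKeyPre p.1 ∧ (pvKeyPre hand.1).length < (pvKeyPre p.1).length) := by
    intro p hp
    have hpp := (List.all_eq_true.mp hl0) p hp
    rw [Bool.and_eq_true] at hpp
    rcases hpp with ⟨h1, h2⟩
    refine ⟨by simpa [pvValidStr, List.all_eq_true, List.contains_iff_mem] using h1, ?_⟩
    rintro ⟨hpfx, hlt⟩
    rw [Bool.not_eq_eq_eq_not, Bool.not_true, Bool.and_eq_false_iff] at h2
    rcases h2 with h2 | h2
    · exact absurd (List.isPrefixOf_iff_prefix.mpr hpfx) (by simp [h2])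
    · simp [hlt] at h2
  unfold Spec_insert_hand_p2 insert_hand_p2 insert_hand_p2_alt
  -- A's per-element test agrees with B's key comparison on members of l
  have hQP : ∀ x ∈ l, pvGeP2 x.1.toList hand.1.toList
      = pvListLeB (pvKeyB x.1) (pvKeyB hand.1) := by
    intro x hx
    rw [pv_ge_eq_lex _ _ (hl x hx).1 hhand (fun hc => (hl x hx).2 hc),
        pv_keyB_eq _ (hl x hx).1, pv_keyB_eq _ hhand, pv_lexle_cast]
    rfl
  -- members of l translate P into the Pre_ lex order against hand
  have hPlex : ∀ x ∈ l, pvListLeB (pvKeyB x.1) (pvKeyB hand.1)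
      = pvLexLePre (pvKeyPre x.1) (pvKeyPre hand.1) := by
    intro x hx
    rw [pv_keyB_eq _ (hl x hx).1, pv_keyB_eq _ hhand, pv_lexle_cast]
  have htle : ((l.takeWhile (fun x => pvListLeB (pvKeyB x.1) (pvKeyB hand.1))).length) ≤ l.length :=
    (List.takeWhile_prefix _).length_le
  have hpreP : ∀ j (hj : j < l.length),
      j < (l.takeWhile (fun x => pvListLeB (pvKeyB x.1) (pvKeyB hand.1))).length →
      pvListLeB (pvKeyB l[j].1) (pvKeyB hand.1) = true := by
    intro j hj hjt
    have hpfx := List.takeWhile_prefix (l := l) (fun x => pvListLeB (pvKeyB x.1) (pvKeyB hand.1))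
    have hget := List.IsPrefix.getElem hpfx hjt
    have hp' := List.mem_takeWhile_imp
      (p := fun x => pvListLeB (pvKeyB x.1) (pvKeyB hand.1)) (l := l)
      (List.getElem_mem hjt)
    rw [hget] at hp'
    exact hp'
  have hpostP : ∀ j (hj : j < l.length),
      (l.takeWhile (fun x => pvListLeB (pvKeyB x.1) (pvKeyB hand.1))).length ≤ j →
      pvListLeB (pvKeyB l[j].1) (pvKeyB hand.1) = false := by
    intro j hj hjt
    rcases Nat.eq_or_lt_of_le hjt with he | hlt
    · have := pv_boundary (fun x => pvListLeB (pvKeyB x.1) (pvKeyB hand.1)) l (he ▸ hj)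
      simpa [← he] using this
    · -- j is strictly past the boundary t: use the monotone-split precondition
      have ht_lt : (l.takeWhile (fun x => pvListLeB (pvKeyB x.1) (pvKeyB hand.1))).length < l.length := by omega
      have hft := pv_boundary (fun x => pvListLeB (pvKeyB x.1) (pvKeyB hand.1)) l ht_lt
      by_contra hc
      have hcj : pvListLeB (pvKeyB l[j].1) (pvKeyB hand.1) = true := by
        cases hb : pvListLeB (pvKeyB l[j].1) (pvKeyB hand.1) with
        | false => exact absurd hb hc
        | true => rfl
      have hsort := (List.pairwise_iff_getElem.mp hsorted0) _ j ht_lt hj hlt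
      have h1 : pvLexLePre (pvKeyPre (l[j].1)) (pvKeyPre hand.1) = true := by
        rw [← hPlex _ (List.getElem_mem hj)]; exact hcj
      have h2 : pvLexLePre (pvKeyPre ((l[(l.takeWhile (fun x => pvListLeB (pvKeyB x.1) (pvKeyB hand.1))).length]'ht_lt).1)) (pvKeyPre hand.1) = true :=
        (pv_lexle_iff _ _).mpr (hsort ((pv_lexle_iff _ _).mp h1))
      have h3 := hPlex _ (List.getElem_mem ht_lt)
      rw [h3, h2] at hft
      exact Bool.noConfusion hft
  have hbi := pv_bisect_eq l (pvKeyB hand.1)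
      ((l.takeWhile (fun x => pvListLeB (pvKeyB x.1) (pvKeyB hand.1))).length)
      hpreP hpostP l.length 0 l.length (by omega) (by omega) htle le_rfl
  show pvScanA hand l = PySem.List.insert l ((pvBisectB l (pvKeyB hand.1) 0 l.length : Nat) : Int) hand
  rw [hbi, PySem.List.insert_natCast l _ hand htle, pv_scanA_eq,
      pv_takeWhile_congr _ _ l hQP, pv_dropWhile_congr _ _ l hQP]
  have h1 : l.take ((l.takeWhile (fun x => pvListLeB (pvKeyB x.1) (pvKeyB hand.1))).length)
      = l.takeWhile (fun x => pvListLeB (pvKeyB x.1) (pvKeyB hand.1)) :=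
    (List.prefix_iff_eq_take.mp (List.takeWhile_prefix _)).symm
  have h2 : l.drop ((l.takeWhile (fun x => pvListLeB (pvKeyB x.1) (pvKeyB hand.1))).length)
      = l.dropWhile (fun x => pvListLeB (pvKeyB x.1) (pvKeyB hand.1)) := by
    have h3 := List.take_append_drop ((l.takeWhile (fun x => pvListLeB (pvKeyB x.1) (pvKeyB hand.1))).length) l
    rw [h1] at h3
    have h4 := List.takeWhile_append_dropWhile (p := fun x => pvListLeB (pvKeyB x.1) (pvKeyB hand.1)) (l := l)
    exact List.append_cancel_left (h3.trans h4.symm)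
  rw [h1, h2]
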